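-- pv_equiv track=rewrite | github.com/HaroldGalaviz915/P3_Akinator | Akinator_KNY/akinator_kimetsu_gui.py | filtrar_personajes
-- ===== SOURCE A (Python) =====
-- def filtrar_personajes(candidatos, respuestas):
--     resultado = {}
--     for nombre, atributos in candidatos.items():
--         coincide = True
--         for a, v in respuestas.items():
--             if a in atributos and atributos[a] != v:
--                 coincide = False
--                 break
--         if coincide:
--             resultado[nombre] = atributos
--     return resultado
-- ===== SOURCE B (Python) =====
-- def filtrar_personajes(candidatos, respuestas):
--     resultado = dict(candidatos)
--     for a, v in respuestas.items():
--         resultado = {nombre: atributos for nombre, atributos in resultado.items()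
--                      if a not in atributos or atributos[a] == v}
--     return resultado
-- ===== Notes on version B (the rewrite author's own statement) =====
-- stated objective: alternative
-- what changed: B is answer-major: it keeps a shrinking dict of surviving candidates and applies one answer-constraint per pass, instead of A's candidate-major scan that checks every answer per candidate with an early break.
import Mathlib
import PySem

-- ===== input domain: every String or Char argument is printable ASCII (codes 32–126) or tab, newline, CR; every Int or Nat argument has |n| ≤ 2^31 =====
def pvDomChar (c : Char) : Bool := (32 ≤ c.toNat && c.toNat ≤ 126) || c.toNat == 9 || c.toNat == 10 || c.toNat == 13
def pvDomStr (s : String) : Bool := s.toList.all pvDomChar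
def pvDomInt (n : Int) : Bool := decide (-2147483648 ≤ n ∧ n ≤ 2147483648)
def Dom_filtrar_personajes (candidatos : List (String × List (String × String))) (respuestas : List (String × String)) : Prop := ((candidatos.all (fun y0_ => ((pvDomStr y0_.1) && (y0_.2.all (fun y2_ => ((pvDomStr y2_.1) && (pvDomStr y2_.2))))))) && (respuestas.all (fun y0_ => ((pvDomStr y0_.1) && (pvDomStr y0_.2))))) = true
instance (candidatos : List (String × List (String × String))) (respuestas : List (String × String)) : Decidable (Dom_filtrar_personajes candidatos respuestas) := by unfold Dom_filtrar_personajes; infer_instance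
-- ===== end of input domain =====

-- B is answer-major (one pass per answer over a shrinking survivor dict) instead of
-- A's candidate-major check of all answers per candidate with an early break.

-- ===== PORT A =====
-- inner loop of A: 'for a, v in respuestas.items(): if a in atributos and atributos[a] != v: break'
-- (the lookup atributos[a] is guarded by 'a in atributos', so the get? pattern-match is exact)
def coincideLoop (respuestas : List (String × String)) (atributos : List (String × String)) : Bool :=
  match respuestas with
  | [] => true
  | (a, v) :: rest =>
      match (PySem.Dict.mk atributos).get? a with
      | some w => if w != v then false else coincideLoop rest atributos
      | none => coincideLoop rest atributos

def filtrar_personajes (candidatos : List (String × List (String × String))) (respuestas : List (String × String)) : List (String × List (String × String)) :=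
  (candidatos.foldl
    (fun resultado p =>
      if coincideLoop respuestas p.2 then resultado.insert p.1 p.2 else resultado)
    (PySem.Dict.empty : PySem.Dict String (List (String × String)))).items

-- ===== PORT B =====
-- 'a not in atributos or atributos[a] == v'
def keepB (atributos : List (String × String)) (q : String × String) : Bool :=
  match (PySem.Dict.mk atributos).get? q.1 with
  | none => true
  | some w => w == q.2

def filtrar_personajes_alt (candidatos : List (String × List (String × String))) (respuestas : List (String × String)) : List (String × List (String × String)) :=
  (respuestas.foldl
    (fun resultado q => PySem.Dict.mk (resultado.items.filter (fun p => keepB p.2 q)))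
    (PySem.Dict.mk candidatos)).items

-- ===== PRECONDITION & SPEC =====
-- Pre_ excludes candidatos lists with duplicate candidate names: candidatos is a Python dict,
-- which cannot contain duplicate keys, so A is never called on such an input.
def Pre_filtrar_personajes (candidatos : List (String × List (String × String))) (respuestas : List (String × String)) : Prop :=
  (candidatos.map Prod.fst).Nodup
instance (candidatos : List (String × List (String × String))) (respuestas : List (String × String)) : Decidable (Pre_filtrar_personajes candidatos respuestas) := by unfold Pre_filtrar_personajes; infer_instance

def pvWitness_filtrar_personajes : (List (String × List (String × String))) × (List (String × String)) :=
  ([("tanjiro", [("pelo", "negro")]), ("zenitsu", [("pelo", "rubio")])], [("pelo", "negro")])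

def Spec_filtrar_personajes (candidatos : List (String × List (String × String))) (respuestas : List (String × String)) (out : List (String × List (String × String))) : Prop := out = filtrar_personajes_alt candidatos respuestas
instance (candidatos : List (String × List (String × String))) (respuestas : List (String × String)) (out : List (String × List (String × String))) : Decidable (Spec_filtrar_personajes candidatos respuestas out) := by unfold Spec_filtrar_personajes; infer_instance

-- ===== CLAIM (what is proved, stated in full; the proofs are below) =====
def Claim_equal_filtrar_personajes : Prop := ∀ (candidatos : List (String × List (String × String))) (respuestas : List (String × String)), Dom_filtrar_personajes candidatos respuestas → Pre_filtrar_personajes candidatos respuestas → Spec_filtrar_personajes candidatos respuestas (filtrar_personajes candidatos respuestas)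

-- ===== LEMMAS AND PROOFS =====

-- A's early-break inner loop decides exactly 'all answers are kept'.
theorem coincideLoop_eq_all (respuestas atributos : List (String × String)) :
    coincideLoop respuestas atributos = respuestas.all (keepB atributos) := by
  induction respuestas with
  | nil => rfl
  | cons q rest ih =>
      obtain ⟨a, v⟩ := q
      simp only [coincideLoop, List.all_cons, keepB]
      cases h : (PySem.Dict.mk atributos).get? a with
      | none => simpa using ih
      | some w =>
          by_cases hw : w = v
          · simp [hw, ih]
          · simp [hw, bne_iff_ne, (by simpa using hw : (w == v) = false)]

-- A's conditional-insert loop over fresh distinct keys appends the filtered list.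
theorem aFold (cond : String × List (String × String) → Bool) :
    ∀ (l : List (String × List (String × String)))
      (d : PySem.Dict String (List (String × String))),
      (l.map Prod.fst).Nodup → (∀ p ∈ l, d.contains p.1 = false) →
      (l.foldl (fun d p => if cond p then d.insert p.1 p.2 else d) d).items
        = d.items ++ l.filter cond := by
  intro l
  induction l with
  | nil => intro d _ _; simp
  | cons p rest ih =>
      intro d hnd hfresh
      have hnd' : (rest.map Prod.fst).Nodup := (List.nodup_cons.mp hnd).2
      have hne : ∀ q ∈ rest, q.1 ≠ p.1 := by
        intro q hq h
        exact (List.nodup_cons.mp hnd).1 (h ▸ List.mem_map_of_mem hq)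
      simp only [List.foldl_cons]
      by_cases hc : cond p = true
      · have hfresh' : ∀ q ∈ rest, (d.insert p.1 p.2).contains q.1 = false := by
          intro q hq
          rw [PySem.Dict.contains_insert]
          simp [hne q hq, hfresh q (List.mem_cons_of_mem _ hq)]
        rw [if_pos hc, ih _ hnd' hfresh',
            PySem.Dict.items_insert_of_not_contains _ _ (hfresh p (List.mem_cons_self ..))]
        simp [hc]
      · rw [if_neg hc, ih _ hnd' (fun q hq => hfresh q (List.mem_cons_of_mem _ hq))]
        simp [hc]

-- B's pass-per-answer filtering fold equals a single filter by 'all answers kept'.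
theorem bFold :
    ∀ (r : List (String × String)) (l : List (String × List (String × String))),
      ((r.foldl
        (fun (resultado : PySem.Dict String (List (String × String))) q =>
          PySem.Dict.mk (resultado.items.filter (fun p => keepB p.2 q)))
        (PySem.Dict.mk l)).items)
        = l.filter (fun p => r.all (keepB p.2)) := by
  intro r
  induction r with
  | nil => intro l; simp
  | cons q rest ih =>
      intro l
      simp only [List.foldl_cons]
      have : (PySem.Dict.mk l).items = l := rfl
      rw [show (PySem.Dict.mk ((PySem.Dict.mk l).items.filter (fun p => keepB p.2 q)))
            = PySem.Dict.mk (l.filter (fun p => keepB p.2 q)) from rfl, ih,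
          List.filter_filter]
      apply List.filter_congr
      intro p _
      simp [List.all_cons, Bool.and_comm]

-- ===== VERDICT (by name: the statement is the Claim_ definition above) =====
theorem filtrar_personajes_spec : Claim_equal_filtrar_personajes := by
  intro candidatos respuestas _ hpre
  unfold Spec_filtrar_personajes filtrar_personajes filtrar_personajes_alt
  rw [aFold _ _ _ hpre (by intro p _; simp), bFold]
  simp [coincideLoop_eq_all, PySem.Dict.empty]
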